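-- pv_equiv track=rewrite | github.com/little-isaac/scaler | intermediate/day_23/hw_minimum_picks.py | solve
-- ===== SOURCE A (Python) =====
-- def solve(A):
--     maximum = None
--     minimum = None
--     for ele in A:
--         if ele % 2 == 0:
--             if maximum is None or maximum < ele:
--                 maximum = ele
--         else:
--             if minimum is None or minimum > ele:
--                 minimum = ele
--     return maximum - minimum
-- ===== SOURCE B (Python) =====
-- def solve(A):
--     s = sorted(A)
--     minimum = next((x for x in s if x % 2 == 1), None)
--     maximum = next((x for x in reversed(s) if x % 2 == 0), None)
--     return maximum - minimum
-- ===== Notes on version B (the rewrite author's own statement) =====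
-- stated objective: alternative
-- what changed: Sort-then-scan instead of a tracking loop: B sorts the list once and takes the first odd of the ascending order and the first even of the descending order, replacing A's interleaved running min/max accumulator pass.
import Mathlib
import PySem

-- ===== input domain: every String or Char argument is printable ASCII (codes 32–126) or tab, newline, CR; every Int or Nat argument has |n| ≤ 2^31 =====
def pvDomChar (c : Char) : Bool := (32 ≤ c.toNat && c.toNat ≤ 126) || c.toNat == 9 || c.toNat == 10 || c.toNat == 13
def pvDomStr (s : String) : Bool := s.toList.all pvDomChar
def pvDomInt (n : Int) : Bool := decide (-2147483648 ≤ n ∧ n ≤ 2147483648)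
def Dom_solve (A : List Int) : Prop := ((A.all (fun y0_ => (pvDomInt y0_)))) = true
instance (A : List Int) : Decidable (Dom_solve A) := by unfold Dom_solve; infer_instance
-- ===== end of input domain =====

-- B computes max even minus min odd by sorting once and scanning for the first odd
-- (ascending) and first even (descending), instead of A's running min/max accumulator loop
-- (objective: alternative).

-- ===== PORT A =====
-- one loop step of A: track running max of evens and running min of odds as Options
def solveStep (st : Option Int × Option Int) (ele : Int) : Option Int × Option Int :=
  if PySem.Int.mod ele 2 == 0 then
    match st.1 with
    | none => (some ele, st.2)
    | some m => if m < ele then (some ele, st.2) else st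
  else
    match st.2 with
    | none => (st.1, some ele)
    | some m => if m > ele then (st.1, some ele) else st

def solve (A : List Int) : Int :=
  let st := A.foldl solveStep (none, none)
  -- Python's `maximum - minimum` raises TypeError when either is None; those inputs are outside Pre_solve
  st.1.getD 0 - st.2.getD 0

-- ===== PORT B =====
def solve_alt (A : List Int) : Int :=
  let s := PySem.List.sorted A (fun x => x) false
  -- next((x for x in s if x % 2 == 1), None)
  let minimum := s.find? (fun x => PySem.Int.mod x 2 == 1)
  -- next((x for x in reversed(s) if x % 2 == 0), None)
  let maximum := s.reverse.find? (fun x => PySem.Int.mod x 2 == 0)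
  -- `maximum - minimum` raises TypeError on a None; outside Pre_solve
  maximum.getD 0 - minimum.getD 0

-- ===== PRECONDITION & SPEC =====
-- Pre_ excludes lists lacking an even or lacking an odd element, on which Python A raises TypeError (None minus int).
def Pre_solve (A : List Int) : Prop :=
  (∃ x ∈ A, PySem.Int.mod x 2 = 0) ∧ (∃ x ∈ A, PySem.Int.mod x 2 = 1)
instance (A : List Int) : Decidable (Pre_solve A) := by unfold Pre_solve; infer_instance
def pvWitness_solve : List Int := [2, 3]

def Spec_solve (A : List Int) (out : Int) : Prop := out = solve_alt A
instance (A : List Int) (out : Int) : Decidable (Spec_solve A out) := by unfold Spec_solve; infer_instance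

-- ===== CLAIM (what is proved, stated in full; the proofs are below) =====
def Claim_equal_solve : Prop := ∀ (A : List Int), Dom_solve A → Pre_solve A → Spec_solve A (solve A)

-- ===== LEMMAS AND PROOFS =====

-- pointwise max/min on optional values (None = "not seen yet")
def omax (a b : Option Int) : Option Int :=
  match a, b with
  | none, b => b
  | a, none => a
  | some x, some y => some (max x y)

def omin (a b : Option Int) : Option Int :=
  match a, b with
  | none, b => b
  | a, none => a
  | some x, some y => some (min x y)

lemma pmod_two (y : Int) : PySem.Int.mod y 2 = y % 2 :=
  PySem.Int.mod_eq_emod_of_pos (by norm_num)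

lemma omax_assoc (a b c : Option Int) : omax (omax a b) c = omax a (omax b c) := by
  cases a <;> cases b <;> cases c <;> simp [omax, max_assoc]

lemma omin_assoc (a b c : Option Int) : omin (omin a b) c = omin a (omin b c) := by
  cases a <;> cases b <;> cases c <;> simp [omin, min_assoc]

lemma max?_cons (x : Int) (t : List Int) :
    PySem.List.max? (x :: t) (fun y => y) = omax (some x) (PySem.List.max? t (fun y => y)) := by
  cases t with
  | nil =>
    rw [PySem.List.max?_id_cons, (PySem.List.max?_eq_none_iff _ _).2 rfl]
    rfl
  | cons z t =>
    rw [PySem.List.max?_id_cons, PySem.List.max?_id_cons]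
    simp only [List.foldl_cons, omax]
    induction t generalizing x z with
    | nil => simp
    | cons w t ih => simp only [List.foldl_cons, max_assoc]; rw [ih]

lemma min?_cons (x : Int) (t : List Int) :
    PySem.List.min? (x :: t) (fun y => y) = omin (some x) (PySem.List.min? t (fun y => y)) := by
  cases t with
  | nil =>
    rw [PySem.List.min?_id_cons, (PySem.List.min?_eq_none_iff _ _).2 rfl]
    rfl
  | cons z t =>
    rw [PySem.List.min?_id_cons, PySem.List.min?_id_cons]
    simp only [List.foldl_cons, omin]
    induction t generalizing x z with
    | nil => simp
    | cons w t ih => simp only [List.foldl_cons, min_assoc]; rw [ih]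

lemma solveStep_eq (st : Option Int × Option Int) (ele : Int) :
    solveStep st ele =
      (if PySem.Int.mod ele 2 == 0 then (omax st.1 (some ele), st.2)
       else (st.1, omin st.2 (some ele))) := by
  obtain ⟨m, n⟩ := st
  unfold solveStep
  split
  · cases m with
    | none => simp [omax]
    | some v =>
      simp only [omax]
      by_cases h : v < ele
      · simp [h, max_eq_right (le_of_lt h)]
      · simp [h, max_eq_left (le_of_not_gt h)]
  · cases n with
    | none => simp [omin]
    | some v =>
      simp only [omin]
      by_cases h : v > ele
      · simp [h, min_eq_right (le_of_lt h)]
      · simp [h, min_eq_left (le_of_not_gt h)]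

-- A's fold computes (max of evens, min of odds)
lemma fold_eq (A : List Int) : ∀ (m n : Option Int),
    A.foldl solveStep (m, n) =
      (omax m (PySem.List.max? (A.filter (fun x => x % 2 == 0)) (fun y => y)),
       omin n (PySem.List.min? (A.filter (fun x => x % 2 == 1)) (fun y => y))) := by
  induction A with
  | nil =>
    intro m n
    simp only [List.foldl_nil, List.filter_nil]
    rw [(PySem.List.max?_eq_none_iff _ _).2 rfl, (PySem.List.min?_eq_none_iff _ _).2 rfl]
    cases m <;> cases n <;> simp [omax, omin]
  | cons x t ih =>
    intro m n
    rcases Int.emod_two_eq x with h | h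
    · simp only [List.foldl_cons, solveStep_eq, List.filter_cons, pmod_two, h]
      norm_num
      rw [ih, max?_cons, omax_assoc]
    · simp only [List.foldl_cons, solveStep_eq, List.filter_cons, pmod_two, h]
      norm_num
      rw [ih, min?_cons, omin_assoc]

-- find? scans to the first element satisfying p, i.e. the head of the filtered list
lemma find?_eq_head?_filter {α : Type} (p : α → Bool) :
    ∀ (l : List α), l.find? p = (l.filter p).head? := by
  intro l
  induction l with
  | nil => rfl
  | cons x t ih =>
    by_cases h : p x = true
    · rw [List.find?_cons_of_pos h, List.filter_cons_of_pos h, List.head?_cons]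
    · rw [List.find?_cons_of_neg h, List.filter_cons_of_neg h, ih]

-- the first odd of the ascending sort is the minimum odd
lemma find?_sorted_eq_min? (p : Int → Bool) (A : List Int) :
    (PySem.List.sorted A (fun x => x) false).find? p =
      PySem.List.min? (A.filter p) (fun y => y) := by
  rw [find?_eq_head?_filter]
  set s := PySem.List.sorted A (fun x => x) false with hs
  have hperm : (s.filter p).Perm (A.filter p) :=
    (PySem.List.sorted_perm A (fun x => x) false).filter p
  cases hf : s.filter p with
  | nil =>
    rw [hf] at hperm
    rw [hperm.symm.eq_nil, (PySem.List.min?_eq_none_iff _ _).2 rfl]; rfl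
  | cons h t =>
    have hAf : A.filter p ≠ [] := by
      intro h0; rw [h0] at hperm; rw [hf] at hperm; exact absurd hperm.eq_nil (by simp)
    obtain ⟨m, hm⟩ : ∃ m, PySem.List.min? (A.filter p) (fun y => y) = some m := by
      cases hmin : PySem.List.min? (A.filter p) (fun y => y) with
      | none => exact absurd ((PySem.List.min?_eq_none_iff _ _).1 hmin) hAf
      | some m => exact ⟨m, rfl⟩
    rw [hm]
    simp only [List.head?_cons, Option.some.injEq]
    -- h ∈ A.filter p and h ≤ every element of s.filter p (sortedness), so h ≤ m; and m ≤ h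
    have hmem : h ∈ A.filter p := hperm.mem_iff.1 (by rw [hf]; exact List.mem_cons_self)
    have hle : ∀ y ∈ A.filter p, h ≤ y := by
      intro y hy
      have hy' : y ∈ s.filter p := hperm.mem_iff.2 hy
      rw [hf] at hy'
      rcases List.mem_cons.1 hy' with rfl | hy'
      · exact le_refl _
      · have hpw : (s.filter p).Pairwise (fun a b : Int => a ≤ b) :=
          (PySem.List.sorted_pairwise A (fun x => x)).filter p
        rw [hf] at hpw
        exact (List.pairwise_cons.1 hpw).1 y hy'
    have h1 : m ≤ h := PySem.List.min?_isMin hm h hmem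
    have h2 : h ≤ m := hle m (PySem.List.min?_mem hm)
    exact le_antisymm h2 h1

-- the first even of the descending order is the maximum even
lemma find?_rev_sorted_eq_max? (p : Int → Bool) (A : List Int) :
    (PySem.List.sorted A (fun x => x) false).reverse.find? p =
      PySem.List.max? (A.filter p) (fun y => y) := by
  rw [find?_eq_head?_filter]
  set s := PySem.List.sorted A (fun x => x) false with hs
  rw [List.filter_reverse]
  have hperm : ((s.filter p).reverse).Perm (A.filter p) :=
    (List.reverse_perm _).trans ((PySem.List.sorted_perm A (fun x => x) false).filter p)
  cases hf : (s.filter p).reverse with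
  | nil =>
    rw [hf] at hperm
    rw [hperm.symm.eq_nil, (PySem.List.max?_eq_none_iff _ _).2 rfl]; rfl
  | cons h t =>
    have hAf : A.filter p ≠ [] := by
      intro h0; rw [h0] at hperm; rw [hf] at hperm; exact absurd hperm.eq_nil (by simp)
    obtain ⟨m, hm⟩ : ∃ m, PySem.List.max? (A.filter p) (fun y => y) = some m := by
      cases hmax : PySem.List.max? (A.filter p) (fun y => y) with
      | none => exact absurd ((PySem.List.max?_eq_none_iff _ _).1 hmax) hAf
      | some m => exact ⟨m, rfl⟩
    rw [hm]
    simp only [List.head?_cons, Option.some.injEq]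
    have hmem : h ∈ A.filter p := hperm.mem_iff.1 (by rw [hf]; exact List.mem_cons_self)
    have hge : ∀ y ∈ A.filter p, y ≤ h := by
      intro y hy
      have hy' : y ∈ (s.filter p).reverse := hperm.mem_iff.2 hy
      rw [hf] at hy'
      rcases List.mem_cons.1 hy' with rfl | hy'
      · exact le_refl _
      · have hpw : ((s.filter p).reverse).Pairwise (fun a b : Int => b ≤ a) := by
          rw [List.pairwise_reverse]
          exact (PySem.List.sorted_pairwise A (fun x => x)).filter p
        rw [hf] at hpw
        exact (List.pairwise_cons.1 hpw).1 y hy'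
    have h1 : h ≤ m := PySem.List.max?_isMax hm h hmem
    have h2 : m ≤ h := hge m (PySem.List.max?_mem hm)
    exact le_antisymm h1 h2

-- ===== VERDICT (by name: the statement is the Claim_ definition above) =====
theorem solve_spec : Claim_equal_solve := by
  intro A _ _
  unfold Spec_solve solve solve_alt
  simp only [pmod_two]
  rw [fold_eq, find?_sorted_eq_min?, find?_rev_sorted_eq_max?]
  simp [omax, omin]
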